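-- pv_equiv track=rewrite | github.com/sajjadium/ctf-archives | ctfs/DawgCTF/2025/crypto/Jokesmith/server.py | hideFlag
-- ===== SOURCE A (Python) =====
-- def hideFlag(message):
--     hidden = ""
--     start = False
--     for c in message:
--         if (start):
--             hidden += "X"
--         else:
--             hidden += c
--         if c == "{":
--             start = True
--     if (start):
--         hidden = hidden[:-1] + "}"
--     return hidden
-- ===== SOURCE B (Python) =====
-- def hideFlag(message):
--     i = message.find('{')
--     if i == -1:
--         return message
--     s = message[:i+1] + 'X' * (len(message) - i - 1)
--     return s[:-1] + '}'
-- ===== Notes on version B (the rewrite author's own statement) =====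
-- stated objective: faster
-- what changed: Replaces the character-by-character accumulation loop with a state flag by a single find of the brace plus slice and string-repeat construction.
import Mathlib
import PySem

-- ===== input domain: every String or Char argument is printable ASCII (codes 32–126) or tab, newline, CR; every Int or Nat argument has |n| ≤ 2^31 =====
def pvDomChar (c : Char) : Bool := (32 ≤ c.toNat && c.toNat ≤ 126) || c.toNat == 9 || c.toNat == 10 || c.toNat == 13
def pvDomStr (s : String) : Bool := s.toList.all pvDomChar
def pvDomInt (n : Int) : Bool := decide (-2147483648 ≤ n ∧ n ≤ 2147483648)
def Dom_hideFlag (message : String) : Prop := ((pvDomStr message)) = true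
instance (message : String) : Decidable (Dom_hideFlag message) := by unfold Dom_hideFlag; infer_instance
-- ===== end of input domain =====

-- B replaces A's char-by-char accumulation loop by find('{') + slice/repeat construction (simpler).

-- ===== PORT A =====
-- the 'for c in message' loop of A, carrying (hidden, start)
def hideFlagLoop : List Char → List Char → Bool → List Char × Bool
  | [], hidden, start => (hidden, start)
  | c :: rest, hidden, start =>
      hideFlagLoop rest (if start then hidden ++ ['X'] else hidden ++ [c])
        (if c = '{' then true else start)

def hideFlag (message : String) : String :=
  let st := hideFlagLoop message.toList [] false
  -- if start: hidden = hidden[:-1] + "}"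
  let hidden := if st.2 then PySem.List.slice st.1 none (some (-1)) ++ ['}'] else st.1
  String.ofList hidden

-- ===== PORT B =====
def hideFlag_alt (message : String) : String :=
  let i := PySem.Str.find message "{"
  if i = -1 then message
  else
    let s := PySem.List.slice message.toList none (some (i + 1)) ++
      PySem.List.pyRepeat ['X'] ((PySem.Str.len message : Int) - i - 1)
    String.ofList (PySem.List.slice s none (some (-1)) ++ ['}'])

-- ===== PRECONDITION & SPEC =====
def Spec_hideFlag (message : String) (out : String) : Prop := out = hideFlag_alt message
instance (message : String) (out : String) : Decidable (Spec_hideFlag message out) := by unfold Spec_hideFlag; infer_instance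

-- ===== CLAIM (what is proved, stated in full; the proofs are below) =====
def Claim_equal_hideFlag : Prop := ∀ (message : String), Dom_hideFlag message → Spec_hideFlag message (hideFlag message)

-- ===== LEMMAS AND PROOFS =====

-- once start is true, every remaining character appends an 'X'
theorem hideFlagLoop_true (cs hidden : List Char) :
    hideFlagLoop cs hidden true = (hidden ++ List.replicate cs.length 'X', true) := by
  induction cs generalizing hidden with
  | nil => simp [hideFlagLoop]
  | cons c rest ih =>
      simp [hideFlagLoop, ih, List.replicate_succ]

-- with no brace, the loop just copies the input
theorem hideFlagLoop_no_brace (cs hidden : List Char) (h : '{' ∉ cs) :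
    hideFlagLoop cs hidden false = (hidden ++ cs, false) := by
  induction cs generalizing hidden with
  | nil => simp [hideFlagLoop]
  | cons c rest ih =>
      have hc : c ≠ '{' := fun hc => h (hc ▸ List.mem_cons_self)
      have hr : '{' ∉ rest := fun hr => h (List.mem_cons_of_mem _ hr)
      simp [hideFlagLoop, hc, ih _ hr]

-- the general shape: input split at the first brace
theorem hideFlagLoop_split (pre post hidden : List Char) (hpre : '{' ∉ pre) :
    hideFlagLoop (pre ++ '{' :: post) hidden false =
      (hidden ++ pre ++ '{' :: List.replicate post.length 'X', true) := by
  induction pre generalizing hidden with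
  | nil => simp [hideFlagLoop, hideFlagLoop_true]
  | cons c rest ih =>
      have hc : c ≠ '{' := fun hc => hpre (hc ▸ List.mem_cons_self)
      have hr : '{' ∉ rest := fun h => hpre (List.mem_cons_of_mem _ h)
      simp [hideFlagLoop, hc, ih _ hr]

-- the first brace is at index (find cs ['{']).toNat: nothing before it, a '{' there, in range
theorem find_facts (cs : List Char) (h : 0 ≤ PySem.Chars.find cs ['{']) :
    '{' ∉ cs.take (PySem.Chars.find cs ['{']).toNat ∧
    cs[(PySem.Chars.find cs ['{']).toNat]? = some '{' ∧
    (PySem.Chars.find cs ['{']).toNat < cs.length := by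
  obtain ⟨hpre, hmin⟩ := PySem.Chars.find_spec (s := cs) (sub := ['{']) h
  set k := (PySem.Chars.find cs ['{']).toNat with hk
  obtain ⟨t, ht⟩ := hpre
  have hk_lt : k < cs.length := by
    by_contra hle
    push Not at hle
    simp [List.drop_eq_nil_of_le hle] at ht
  refine ⟨?_, ?_, hk_lt⟩
  · intro hmem
    obtain ⟨j, hj, hget⟩ := List.mem_take_iff_getElem.mp hmem
    have hjk : j < k := lt_of_lt_of_le hj (min_le_left _ _)
    refine hmin j hjk ⟨cs.drop (j+1), ?_⟩
    have hd : cs.drop j = cs[j] :: cs.drop (j+1) := List.drop_eq_getElem_cons (by omega)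
    rw [hd, hget]
    rfl
  · have h0 : (cs.drop k)[0]? = some '{' := by rw [← ht]; rfl
    rw [List.getElem?_drop] at h0
    simpa using h0

-- ===== VERDICT (by name: the statement is the Claim_ definition above) =====
theorem hideFlag_spec : Claim_equal_hideFlag := by
  intro message _
  unfold Spec_hideFlag hideFlag hideFlag_alt
  have hb : ("{" : String).toList = ['{'] := by decide
  by_cases h : PySem.Chars.find message.toList ['{'] = -1
  · have hnin : '{' ∉ message.toList := fun hm =>
      (PySem.Chars.find_eq_neg_one_iff (s := message.toList) (sub := ['{'])).mp h
        ((List.singleton_infix_iff _ _).mpr hm)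
    have hloop := hideFlagLoop_no_brace message.toList [] hnin
    simp [hb, h, hloop, String.ofList_toList]
  · have h0 : 0 ≤ PySem.Chars.find message.toList ['{'] := by
      have := PySem.Chars.neg_one_le_find (s := message.toList) (sub := ['{'])
      omega
    obtain ⟨hpre, hget, hlt⟩ := find_facts message.toList h0
    set k := (PySem.Chars.find message.toList ['{']).toNat with hk
    have hcast : PySem.Chars.find message.toList ['{'] = (k : Int) :=
      (Int.toNat_of_nonneg h0).symm
    -- decompose the input at the first brace
    have hdrop : message.toList.drop k = '{' :: message.toList.drop (k+1) := by
      have hd : message.toList.drop k = message.toList[k] :: message.toList.drop (k+1) :=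
        List.drop_eq_getElem_cons hlt
      rw [hd]
      have : message.toList[k] = '{' := by
        have := hget
        simp [List.getElem?_eq_getElem hlt] at this
        exact this
      rw [this]
    have hsplit : message.toList = message.toList.take k ++ '{' :: message.toList.drop (k+1) := by
      conv_lhs => rw [← List.take_append_drop k message.toList]
      rw [hdrop]
    -- A's loop on that decomposition
    have hloop : hideFlagLoop message.toList [] false =
        (message.toList.take k ++ '{' :: List.replicate (message.toList.drop (k+1)).length 'X', true) := by
      conv_lhs => rw [hsplit]
      simpa using hideFlagLoop_split (message.toList.take k) (message.toList.drop (k+1)) [] hpre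
    -- B's pieces
    have htake : PySem.List.slice message.toList none (some ((k : Int) + 1)) =
        message.toList.take (k+1) := by
      have : ((k : Int) + 1) = ((k+1 : Nat) : Int) := by push_cast; ring
      rw [this, PySem.List.slice_to_natCast]
    have htake1 : message.toList.take (k+1) = message.toList.take k ++ ['{'] := by
      rw [List.take_add_one]
      congr 1
      rw [hget]
      rfl
    have hrep : PySem.List.pyRepeat ['X'] ((message.toList.length : Int) - (k : Int) - 1) =
        List.replicate (message.toList.drop (k+1)).length 'X' := by
      rw [PySem.List.pyRepeat_singleton]
      congr 1
      simp [List.length_drop]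
      omega
    simp only [PySem.Str.find_eq, PySem.Str.len_eq, hb, hcast, hloop]
    rw [if_neg (show ¬((k : Int) = -1) by omega), htake, htake1, hrep]
    simp [PySem.List.slice_to_neg_one]
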